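-- pv_equiv track=rewrite | github.com/next-franzhassmann/code-warrior-python | cw4kyu.py | devuelve_subloques_nxn_en_fila
-- ===== SOURCE A (Python) =====
-- def devuelve_subloques_nxn_en_fila(board,f, n):
--     """ Dado un tablero, devuelve sus subtableros nxn en la fila f"""
--     lista_subloques=[]
--     for col_idx in range (0,len(board),n):
--         l_subfilas=[]
--         for fila_idx in range (f,f+n,1):
--             subfila=board[fila_idx][col_idx:col_idx+n]
--             l_subfilas.append(subfila)
--         lista_subloques.append(l_subfilas)
--     return lista_subloques
-- ===== SOURCE B (Python) =====
-- def devuelve_subloques_nxn_en_fila(board, f, n):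
--     """ Dado un tablero, devuelve sus subtableros nxn en la fila f"""
--     if not board:
--         return []
--     rows = [board[r] for r in range(f, f + n)]
--     row_chunks = [[row[c:c + n] for c in range(0, len(board), n)] for row in rows]
--     return [list(block) for block in zip(*row_chunks)]
-- ===== Notes on version B (the rewrite author's own statement) =====
-- stated objective: alternative
-- what changed: B first gathers the band rows, chunks each row into n-wide slices, and transposes the per-row chunk lists with zip(*...), instead of A's nested column-then-row index loops that build each block slice by slice.
import Mathlib
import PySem

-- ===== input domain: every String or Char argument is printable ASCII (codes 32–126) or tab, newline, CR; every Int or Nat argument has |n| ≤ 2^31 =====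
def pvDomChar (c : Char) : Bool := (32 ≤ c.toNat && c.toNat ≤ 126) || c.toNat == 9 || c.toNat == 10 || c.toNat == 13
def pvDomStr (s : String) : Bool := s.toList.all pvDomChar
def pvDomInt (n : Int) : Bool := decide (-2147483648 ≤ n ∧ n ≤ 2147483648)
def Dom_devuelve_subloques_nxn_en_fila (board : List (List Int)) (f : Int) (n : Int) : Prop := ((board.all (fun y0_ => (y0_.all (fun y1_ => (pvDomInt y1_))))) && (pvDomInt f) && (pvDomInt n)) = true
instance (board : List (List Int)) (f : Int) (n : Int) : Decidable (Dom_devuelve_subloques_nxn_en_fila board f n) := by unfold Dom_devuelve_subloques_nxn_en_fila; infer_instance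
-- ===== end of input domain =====

-- B gathers the band rows, chunks each row, and transposes the chunk lists with zip(*...)
-- instead of A's nested column-then-row index loops; alternative decomposition, same cost.

-- ===== PORT A =====
def devuelve_subloques_nxn_en_fila (board : List (List Int)) (f : Int) (n : Int) : List (List (List Int)) :=
  (PySem.List.pyRange 0 board.length n).foldl (fun lista_subloques col_idx =>
    lista_subloques ++
      [ (PySem.List.pyRange f (f + n) 1).foldl (fun l_subfilas fila_idx =>
          l_subfilas ++
            [ PySem.List.slice (PySem.List.pyGetD board fila_idx []) (some col_idx) (some (col_idx + n)) ]) [] ]) []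

-- ===== PORT B =====
-- zip(*xss) for lists of lists of rows: truncates to the shortest argument; zip() with no args is []
def pvZipStar (xss : List (List (List Int))) : List (List (List Int)) :=
  match (xss.map List.length).min? with
  | none => []
  | some k => (List.range k).map (fun i => xss.map (fun l => l.getD i []))

def devuelve_subloques_nxn_en_fila_alt (board : List (List Int)) (f : Int) (n : Int) : List (List (List Int)) :=
  if board = [] then []
  else
    let rows := (PySem.List.pyRange f (f + n) 1).map (fun r => PySem.List.pyGetD board r [])
    let row_chunks := rows.map (fun row =>
      (PySem.List.pyRange 0 board.length n).map (fun c => PySem.List.slice row (some c) (some (c + n))))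
    pvZipStar row_chunks

-- ===== PRECONDITION & SPEC =====
-- Pre_ excludes exactly the inputs where the Python A raises: n = 0 (range step 0, ValueError)
-- and, for 0 < n with a nonempty board, a band row index outside Python's index range (IndexError).
def Pre_devuelve_subloques_nxn_en_fila (board : List (List Int)) (f : Int) (n : Int) : Prop :=
  n ≠ 0 ∧ (0 < n → board ≠ [] → (-(board.length : Int) ≤ f ∧ f + n ≤ (board.length : Int)))
instance (board : List (List Int)) (f : Int) (n : Int) : Decidable (Pre_devuelve_subloques_nxn_en_fila board f n) := by unfold Pre_devuelve_subloques_nxn_en_fila; infer_instance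
def pvWitness_devuelve_subloques_nxn_en_fila : List (List Int) × Int × Int := ([[1, 2], [3, 4]], 0, 2)

def Spec_devuelve_subloques_nxn_en_fila (board : List (List Int)) (f : Int) (n : Int) (out : List (List (List Int))) : Prop := out = devuelve_subloques_nxn_en_fila_alt board f n
instance (board : List (List Int)) (f : Int) (n : Int) (out : List (List (List Int))) : Decidable (Spec_devuelve_subloques_nxn_en_fila board f n out) := by unfold Spec_devuelve_subloques_nxn_en_fila; infer_instance

-- ===== CLAIM (what is proved, stated in full; the proofs are below) =====
def Claim_equal_devuelve_subloques_nxn_en_fila : Prop := ∀ (board : List (List Int)) (f : Int) (n : Int), Dom_devuelve_subloques_nxn_en_fila board f n → Pre_devuelve_subloques_nxn_en_fila board f n → Spec_devuelve_subloques_nxn_en_fila board f n (devuelve_subloques_nxn_en_fila board f n)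

-- ===== LEMMAS AND PROOFS =====

theorem pvPyRange_self_nil (a s : Int) : PySem.List.pyRange a a s = [] := by
  simp [PySem.List.pyRange]

theorem pvPyRange_neg_nil (a b s : Int) (hs : s < 0) (hab : a ≤ b) :
    PySem.List.pyRange a b s = [] := by
  simp only [PySem.List.pyRange]
  split_ifs with h1 h2 h3 <;> simp_all <;> omega

theorem pvMin?_replicate (n k : Nat) (h : n ≠ 0) : (List.replicate n k).min? = some k := by
  induction n with
  | zero => omega
  | succ m ih =>
    cases m with
    | zero => simp [List.min?]
    | succ p => rw [List.replicate_succ, List.min?_cons]; simp_all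

theorem pvZipStar_transpose (g : Int → Int → List Int) (idxs cols : List Int) (h : idxs ≠ []) :
    pvZipStar (idxs.map (fun r => cols.map (g r))) =
      cols.map (fun c => idxs.map (fun r => g r c)) := by
  unfold pvZipStar
  have hlen : ((idxs.map (fun r => cols.map (g r))).map List.length) =
      List.replicate idxs.length cols.length := by
    simp [Function.comp_def, List.map_const']
  rw [hlen, pvMin?_replicate idxs.length cols.length (by simpa using h)]
  apply List.ext_getElem
  · simp
  · intro i h1 h2
    simp only [List.getElem_map, List.getElem_range, List.map_map, Function.comp]
    refine List.map_congr_left (fun r _ => ?_) 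
    have hi : i < cols.length := by simpa using h2
    simp [List.getD, List.getElem?_map, List.getElem?_eq_getElem hi]

theorem pvPortA_map (board : List (List Int)) (f : Int) (n : Int) :
    devuelve_subloques_nxn_en_fila board f n =
      (PySem.List.pyRange 0 board.length n).map (fun c =>
        (PySem.List.pyRange f (f + n) 1).map (fun r =>
          PySem.List.slice (PySem.List.pyGetD board r []) (some c) (some (c + n)))) := by
  unfold devuelve_subloques_nxn_en_fila
  rw [PySem.List.foldl_append_singleton_eq_map]
  simp only [List.nil_append]
  refine List.map_congr_left (fun c _ => ?_)
  rw [PySem.List.foldl_append_singleton_eq_map]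
  simp

-- ===== VERDICT (by name: the statement is the Claim_ definition above) =====
theorem devuelve_subloques_nxn_en_fila_spec : Claim_equal_devuelve_subloques_nxn_en_fila := by
  intro board f n _ hpre
  unfold Spec_devuelve_subloques_nxn_en_fila
  rw [pvPortA_map]
  unfold devuelve_subloques_nxn_en_fila_alt
  by_cases hb : board = []
  · subst hb
    simp [pvPyRange_self_nil]
  · simp only [if_neg hb, List.map_map, Function.comp]
    rcases lt_trichotomy n 0 with hn | hn | hn
    · have hcols : PySem.List.pyRange 0 (board.length : Int) n = [] :=
        pvPyRange_neg_nil _ _ _ hn (by positivity)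
      have hidx : PySem.List.pyRange f (f + n) 1 = [] :=
        PySem.List.pyRange_one_eq_nil (by omega)
      simp [hcols, hidx, pvZipStar]
    · exact absurd hn hpre.1
    · have hidx : PySem.List.pyRange f (f + n) 1 ≠ [] := by
        have : (PySem.List.pyRange f (f + n) 1).length = n.toNat := by
          simpa using PySem.List.length_pyRange_one f (f + n)
        intro hc; rw [hc] at this; simp at this; omega
      exact (pvZipStar_transpose
        (fun r c => PySem.List.slice (PySem.List.pyGetD board r []) (some c) (some (c + n)))
        _ _ hidx).symm
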